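-- pv_equiv track=rewrite | github.com/ksayee/programming_assignments | python/CodingExercises/LeetCode1324.py | LeetCode1324
-- ===== SOURCE A (Python) =====
-- def LeetCode1324(str1):
--
--     lst=str1.split(' ')
--     stk=[]
--     dict={}
--     i=0
--     for word in lst:
--         stk.append(i)
--         dict[i]=list(word)
--         i=i+1
--
--     output_lst=[]
--     while True:
--         word=[]
--         for key in stk:
--             if len(dict[key])>0:
--                 word.append(dict[key][0])
--                 dict[key].pop(0)
--             else:
--                 word.append(' ')
--         if ''.join(word).replace(' ','')!='':
--             output_lst.append(''.join(word))
--         else: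
--             break
--     return output_lst
-- ===== SOURCE B (Python) =====
-- def LeetCode1324(str1):
--     words = str1.split(' ')
--     n = max(len(w) for w in words)
--     return [''.join(w[i] if i < len(w) else ' ' for w in words) for i in range(n)]
-- ===== Notes on version B (the rewrite author's own statement) =====
-- stated objective: faster
-- what changed: Replaced A's per-word FIFO queues, int-keyed dict, pop(0)-per-column loop and all-spaces sentinel break with a direct transposition: compute the maximum word length once and build row i by indexing character i of every word (padding with a space).
import Mathlib
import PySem

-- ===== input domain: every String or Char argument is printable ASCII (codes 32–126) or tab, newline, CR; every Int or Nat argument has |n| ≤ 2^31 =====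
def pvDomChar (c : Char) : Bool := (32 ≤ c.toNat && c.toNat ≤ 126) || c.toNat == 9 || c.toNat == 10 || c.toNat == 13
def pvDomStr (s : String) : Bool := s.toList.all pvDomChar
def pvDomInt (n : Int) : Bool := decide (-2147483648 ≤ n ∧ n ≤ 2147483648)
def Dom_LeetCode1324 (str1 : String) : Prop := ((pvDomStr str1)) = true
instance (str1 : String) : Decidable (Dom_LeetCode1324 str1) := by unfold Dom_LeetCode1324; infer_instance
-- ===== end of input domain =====

-- B replaces A's queue-popping sentinel loop with an index-based transposition
-- (rows 0..maxlen-1, row i reads character i of every word); same return value; avoids the O(m) pop(0) per word per row.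

-- ===== PORT A =====
-- A keys its dict by the consecutive ints 0..n-1 and walks stk = [0..n-1]; that
-- int-keyed dict of char queues is represented positionally as a List (List Char).
-- One pass of A's inner `for key in stk` loop: builds the column (padding with ' ')
-- and the updated queues (pop(0) on the nonempty ones) together.
def pvStepA : List (List Char) → List Char × List (List Char)
  | [] => ([], [])
  | q :: qs =>
    let r := pvStepA qs
    match q with
    | [] => (' ' :: r.1, [] :: r.2)
    | c :: cs => (c :: r.1, cs :: r.2)

-- lemmas the port's `while True` loop cites for termination
theorem pvReplace_space_go (fuel : Nat) (l acc : List Char) (h : l.length ≤ fuel) :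
    PySem.Chars.replace.go [' '] [] fuel l acc = acc.reverse ++ l.filter (· ≠ ' ') := by
  induction fuel generalizing l acc with
  | zero =>
    cases l with
    | nil => simp [PySem.Chars.replace.go]
    | cons c t => simp at h
  | succ fuel ih =>
    cases l with
    | nil => simp [PySem.Chars.replace.go]
    | cons c t =>
      simp only [List.length_cons, Nat.succ_le_succ_iff] at h
      by_cases hc : c = ' '
      · subst hc
        rw [show PySem.Chars.replace.go [' '] [] (fuel+1) (' ' :: t) acc
              = PySem.Chars.replace.go [' '] [] fuel t acc from by
            simp [PySem.Chars.replace.go, List.isPrefixOf]]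
        rw [ih t acc h]; simp
      · rw [show PySem.Chars.replace.go [' '] [] (fuel+1) (c :: t) acc
              = PySem.Chars.replace.go [' '] [] fuel t (c :: acc) from by
            simp [PySem.Chars.replace.go, List.isPrefixOf]
            exact fun h' => absurd h'.symm hc]
        rw [ih t (c :: acc) h]; simp [hc]

theorem pvReplace_space (w : List Char) :
    PySem.Chars.replace w [' '] [] = w.filter (· ≠ ' ') := by
  simpa [PySem.Chars.replace] using pvReplace_space_go w.length w [] le_rfl

theorem pvStepA_fst (st : List (List Char)) :
    (pvStepA st).1 = st.map (fun w => w.headD ' ') := by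
  induction st with
  | nil => rfl
  | cons q qs ih => cases q <;> simp [pvStepA, ih]

theorem pvStepA_snd (st : List (List Char)) :
    (pvStepA st).2 = st.map List.tail := by
  induction st with
  | nil => rfl
  | cons q qs ih => cases q <;> simp [pvStepA, ih]

theorem pvSum_tail_lt (st : List (List Char)) (h : ∃ w ∈ st, w ≠ []) :
    ((st.map List.tail).map List.length).sum < (st.map List.length).sum := by
  induction st with
  | nil => simp at h
  | cons q qs ih =>
    rcases h with ⟨w, hw, hne⟩
    have hmono : ((qs.map List.tail).map List.length).sum ≤ (qs.map List.length).sum := by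
      clear ih hw hne
      induction qs with
      | nil => simp
      | cons p ps ihp =>
        have : p.tail.length ≤ p.length := by cases p <;> simp
        simp only [List.map_cons, List.sum_cons]
        omega
    rcases List.mem_cons.mp hw with hw | hw
    · cases q with
      | nil => simp_all
      | cons c cs =>
        simp only [List.map_cons, List.sum_cons, List.tail_cons, List.length_cons]
        omega
    · have := ih ⟨w, hw, hne⟩
      have hq : q.tail.length ≤ q.length := by cases q <;> simp
      simp only [List.map_cons, List.sum_cons]
      omega

theorem pvCond_imp_lt (st : List (List Char))
    (h : PySem.Chars.replace (pvStepA st).1 [' '] [] ≠ []) :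
    (((pvStepA st).2.map List.length).sum < (st.map List.length).sum) := by
  rw [pvReplace_space, pvStepA_fst] at h
  rw [pvStepA_snd]
  apply pvSum_tail_lt
  rcases List.exists_mem_of_ne_nil _ h with ⟨c, hc⟩
  rw [List.mem_filter] at hc
  rcases hc with ⟨hc, hcs⟩
  rcases List.mem_map.mp hc with ⟨w, hw, hwc⟩
  refine ⟨w, hw, ?_⟩
  intro hnil
  subst hnil
  simp at hwc
  simp [← hwc] at hcs

-- A's `while True` loop: pop the front char of every queue (space if exhausted);
-- append the row unless it is entirely spaces, in which case break.
def pvLoopA (st : List (List Char)) : List String :=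
  let p := pvStepA st
  if PySem.Chars.replace p.1 [' '] [] ≠ [] then
    String.ofList p.1 :: pvLoopA p.2
  else []
termination_by (st.map List.length).sum
decreasing_by exact pvCond_imp_lt st (by assumption)

def LeetCode1324 (str1 : String) : List String :=
  pvLoopA (((PySem.Str.split? str1 " ").getD []).map String.toList)

-- ===== PORT B =====
-- Source B: words = str1.split(' '); n = max(len(w) for w in words);
--       [''.join(w[i] if i < len(w) else ' ' for w in words) for i in range(n)]
-- (`max` of the nonempty generator ported via PySem.List.max?, with a totality default
--  0 that is never used since split(' ') never returns []; w[i] under 0 ≤ i < len(w)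
--  ported exactly as List.getD.)
def LeetCode1324_alt (str1 : String) : List String :=
  let words := ((PySem.Str.split? str1 " ").getD []).map String.toList
  let n := (PySem.List.max? (words.map List.length) (fun x => x)).getD 0
  (List.range n).map (fun i =>
    String.ofList (words.map (fun w => if i < w.length then w.getD i ' ' else ' ')))

-- ===== PRECONDITION & SPEC =====
def Spec_LeetCode1324 (str1 : String) (out : List String) : Prop := out = LeetCode1324_alt str1
instance (str1 : String) (out : List String) : Decidable (Spec_LeetCode1324 str1 out) := by unfold Spec_LeetCode1324; infer_instance

-- ===== CLAIM (what is proved, stated in full; the proofs are below) =====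
def Claim_equal_LeetCode1324 : Prop := ∀ (str1 : String), Dom_LeetCode1324 str1 → Spec_LeetCode1324 str1 (LeetCode1324 str1)

-- ===== LEMMAS AND PROOFS =====

-- maximal word length, as B computes it
def pvML (st : List (List Char)) : Nat :=
  (PySem.List.max? (st.map List.length) (fun x => x)).getD 0

theorem pvFoldlMax (t : List Nat) (x : Nat) :
    t.foldl max x = max x (t.foldr max 0) := by
  induction t generalizing x with
  | nil => simp
  | cons y t ih =>
    simp only [List.foldl_cons, List.foldr_cons]
    rw [ih (max x y), max_assoc]

theorem pvMax?_getD (ls : List Nat) :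
    (PySem.List.max? ls (fun x => x)).getD 0 = ls.foldr max 0 := by
  cases ls with
  | nil => rfl
  | cons x t =>
    rw [PySem.List.max?_id_cons]
    simp [pvFoldlMax t x]

theorem pvML_eq_foldr (st : List (List Char)) :
    pvML st = (st.map List.length).foldr max 0 := by
  simp [pvML, pvMax?_getD]

theorem pvFoldr_pred (ls : List Nat) :
    (ls.map (fun a => a - 1)).foldr max 0 = ls.foldr max 0 - 1 := by
  induction ls with
  | nil => rfl
  | cons a t ih =>
    simp only [List.map_cons, List.foldr_cons, ih]
    omega

theorem pvML_tail (st : List (List Char)) :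
    pvML (st.map List.tail) = pvML st - 1 := by
  rw [pvML_eq_foldr, pvML_eq_foldr]
  have h1 : (st.map List.tail).map List.length = (st.map List.length).map (fun a => a - 1) := by
    simp only [List.map_map]
    exact List.map_congr_left (fun w _ => by cases w <;> simp)
  rw [h1, pvFoldr_pred]

theorem pvFoldr_eq_zero (ls : List Nat) (h : ls.foldr max 0 = 0) :
    ∀ a ∈ ls, a = 0 := by
  induction ls with
  | nil => simp
  | cons a t ih =>
    simp only [List.foldr_cons] at h
    intro b hb
    rcases List.mem_cons.mp hb with hb | hb
    · omega
    · exact ih (by omega) b hb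

theorem pvML_eq_zero (st : List (List Char)) (h : pvML st = 0) :
    ∀ w ∈ st, w = [] := by
  rw [pvML_eq_foldr] at h
  intro w hw
  have := pvFoldr_eq_zero _ h w.length (List.mem_map.mpr ⟨w, hw, rfl⟩)
  exact List.eq_nil_of_length_eq_zero this

theorem pvFoldr_max_zero (ls : List Nat) (h : ∀ a ∈ ls, a = 0) : ls.foldr max 0 = 0 := by
  induction ls with
  | nil => rfl
  | cons a t ih =>
    have ha := h a (List.mem_cons_self ..)
    simp only [List.foldr_cons, ih (fun b hb => h b (List.mem_cons_of_mem a hb))]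
    omega

theorem pvML_pos (st : List (List Char)) (h : pvML st ≠ 0) :
    ∃ w ∈ st, w ≠ [] := by
  by_contra hc
  simp only [not_exists, not_and, not_not] at hc
  apply h
  rw [pvML_eq_foldr]
  apply pvFoldr_max_zero
  intro a ha
  rcases List.mem_map.mp ha with ⟨w, hw, rfl⟩
  simp [hc w hw]

theorem pvNoSpace_tail (st : List (List Char)) (h : ∀ w ∈ st, ' ' ∉ w) :
    ∀ w ∈ st.map List.tail, ' ' ∉ w := by
  intro w hw
  rcases List.mem_map.mp hw with ⟨u, hu, rfl⟩
  intro hsp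
  exact h u hu (List.mem_of_mem_tail hsp)

theorem pvGetD_tail (w : List Char) (i : Nat) :
    w.tail.getD i ' ' = w.getD (i+1) ' ' := by
  cases w <;> simp [List.getD]

theorem pvIf_getD (st : List (List Char)) (i : Nat) :
    st.map (fun w => if i < w.length then w.getD i ' ' else ' ')
      = st.map (fun w => w.getD i ' ') := by
  apply List.map_congr_left
  intro w _
  by_cases h : i < w.length
  · simp [h]
  · rw [if_neg h, List.getD_eq_default _ _ (Nat.le_of_not_lt h)]

theorem pvHeadD_filter (st : List (List Char)) (hsp : ∀ w ∈ st, ' ' ∉ w) :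
    ((st.map (fun w => w.headD ' ')).filter (· ≠ ' ') = [] ↔ ∀ w ∈ st, w = []) := by
  constructor
  · intro h w hw
    cases w with
    | nil => rfl
    | cons c cs =>
      exfalso
      have hc : c ≠ ' ' := fun hce => hsp _ hw (hce ▸ List.mem_cons_self ..)
      have hmem : c ∈ st.map (fun w => w.headD ' ') :=
        List.mem_map.mpr ⟨c :: cs, hw, rfl⟩
      have : c ∈ (st.map (fun w => w.headD ' ')).filter (· ≠ ' ') :=
        List.mem_filter.mpr ⟨hmem, by simpa using hc⟩
      rw [h] at this
      simp at this
  · intro h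
    rw [List.filter_eq_nil_iff]
    intro c hc
    rcases List.mem_map.mp hc with ⟨w, hw, rfl⟩
    simp [h w hw]

theorem pvCol_succ (st : List (List Char)) (i : Nat) :
    st.map (fun w => w.getD (i+1) ' ') = (st.map List.tail).map (fun w => w.getD i ' ') := by
  rw [List.map_map]
  apply List.map_congr_left
  intro w _
  simp only [Function.comp]
  exact (pvGetD_tail w i).symm

theorem pvMain (n : Nat) (st : List (List Char)) (hml : pvML st = n)
    (hsp : ∀ w ∈ st, ' ' ∉ w) :
    pvLoopA st = (List.range n).map (fun i =>
      String.ofList (st.map (fun w => if i < w.length then w.getD i ' ' else ' '))) := by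
  induction n generalizing st with
  | zero =>
    rw [pvLoopA]
    simp only [pvReplace_space, pvStepA_fst, ne_eq, ite_not, List.range_zero, List.map_nil]
    rw [if_pos ((pvHeadD_filter st hsp).mpr (pvML_eq_zero st hml))]
  | succ n ih =>
    rw [pvLoopA]
    simp only [pvReplace_space, pvStepA_fst, pvStepA_snd, ne_eq, ite_not]
    rw [if_neg (fun hnil => by
      rcases pvML_pos st (by omega) with ⟨w, hw, hne⟩
      exact hne ((pvHeadD_filter st hsp).mp hnil w hw))]
    rw [List.range_succ_eq_map, List.map_cons]
    congr 1
    · congr 1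
      rw [pvIf_getD]
      apply List.map_congr_left
      intro w _
      cases w <;> simp [List.getD]
    · rw [ih (st.map List.tail) (by rw [pvML_tail, hml]; omega) (pvNoSpace_tail st hsp)]
      rw [List.map_map]
      apply List.map_congr_left
      intro i _
      simp only [Function.comp]
      congr 1
      rw [pvIf_getD, pvIf_getD, ← pvCol_succ]

theorem pvSplitOn_go_no_space (fuel : Nat) (l cur : List Char) (acc : List (List Char))
    (hf : l.length < fuel) (hacc : ∀ p ∈ acc, ' ' ∉ p) (hcur : ' ' ∉ cur) :
    ∀ p ∈ PySem.Chars.splitOn.go [' '] fuel l cur acc, ' ' ∉ p := by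
  induction fuel generalizing l cur acc with
  | zero => omega
  | succ fuel ih =>
    cases l with
    | nil =>
      intro p hp
      simp only [PySem.Chars.splitOn.go, List.mem_reverse] at hp
      rcases List.mem_cons.mp hp with rfl | hp
      · simpa using hcur
      · exact hacc p hp
    | cons c t =>
      by_cases hc : c = ' '
      · subst hc
        rw [show PySem.Chars.splitOn.go [' '] (fuel+1) (' ' :: t) cur acc
              = PySem.Chars.splitOn.go [' '] fuel t [] (cur.reverse :: acc) from by
            simp [PySem.Chars.splitOn.go, List.isPrefixOf]]
        exact ih t [] _ (by simp at hf; omega)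
          (fun p hp => by
            rcases List.mem_cons.mp hp with rfl | hp
            · simpa using hcur
            · exact hacc p hp)
          (by simp)
      · rw [show PySem.Chars.splitOn.go [' '] (fuel+1) (c :: t) cur acc
              = PySem.Chars.splitOn.go [' '] fuel t (c :: cur) acc from by
            simp [PySem.Chars.splitOn.go, List.isPrefixOf]
            exact fun h' => absurd h'.symm hc]
        exact ih t (c :: cur) acc (by simp at hf; omega) hacc
          (fun hp => by rcases List.mem_cons.mp hp with h | h; exact hc h.symm; exact hcur h)

theorem pvSplit_no_space (str1 : String) :
    ∀ w ∈ ((PySem.Str.split? str1 " ").getD []).map String.toList, ' ' ∉ w := by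
  have : PySem.Str.split? str1 " "
      = some ((PySem.Chars.splitOn str1.toList [' ']).map String.ofList) := by
    simp [PySem.Str.split?, PySem.Chars.split?]
  rw [this]
  intro w hw
  simp only [Option.getD_some, List.map_map] at hw
  rcases List.mem_map.mp hw with ⟨p, hp, rfl⟩
  have hno := pvSplitOn_go_no_space (str1.toList.length + 1) str1.toList [] []
    (by omega) (by simp) (by simp) p hp
  simpa using hno

-- ===== VERDICT (by name: the statement is the Claim_ definition above) =====
theorem LeetCode1324_spec : Claim_equal_LeetCode1324 := by
  intro str1 _
  unfold Spec_LeetCode1324 LeetCode1324 LeetCode1324_alt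
  exact pvMain _ _ rfl (pvSplit_no_space str1)
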